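-- pv_equiv track=rewrite | github.com/ctc316/algorithm-python | Lintcode/Ladder_59_A1806/1481. Unique Substring.py | uniqueSubstring
-- ===== SOURCE A (Python) =====
-- def uniqueSubstring(s, k):
--     records = set()
--     for i in range(len(s) - k + 1):
--         word = s[i: i + k]
--         if word in records:
--             continue
--
--         records.add(word)
--
--     return sorted(list(records))
-- ===== SOURCE B (Python) =====
-- def _mergeu(xs, ys):
--     out = []
--     i = j = 0
--     while i < len(xs) and j < len(ys):
--         if xs[i] < ys[j]:
--             out.append(xs[i]); i += 1
--         elif ys[j] < xs[i]:
--             out.append(ys[j]); j += 1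
--         else:
--             out.append(xs[i]); i += 1; j += 1
--     out.extend(xs[i:])
--     out.extend(ys[j:])
--     return out
--
-- def _msortu(l):
--     if len(l) <= 1:
--         return l
--     m = len(l) // 2
--     return _mergeu(_msortu(l[:m]), _msortu(l[m:]))
--
-- def uniqueSubstring(s, k):
--     # Natural domain: k >= 0 (a substring length); negative k is not handled.
--     if k < 0:
--         return []
--     words = []
--     t = s
--     while len(t) >= k:
--         words.append(t[:k])
--         if not t:
--             break
--         t = t[1:]
--     return _msortu(words)
-- ===== Notes on version B (the rewrite author's own statement) =====
-- stated objective: alternative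
-- what changed: B collects the length-k windows by walking the suffixes of s (keeping duplicates) and then sorts them with a hand-written merge sort whose merge step drops equal heads, so deduplication happens during merging instead of through A's hash set followed by a library sort; Pre_ restricts to the natural domain k >= 0, since for negative k A's output is an artefact of Python's negative-slice-stop wraparound.
-- outside the precondition, e.g. on uniqueSubstring('abcd', -2): A returns ['', 'ab', 'bc'], B returns []
import Mathlib
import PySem

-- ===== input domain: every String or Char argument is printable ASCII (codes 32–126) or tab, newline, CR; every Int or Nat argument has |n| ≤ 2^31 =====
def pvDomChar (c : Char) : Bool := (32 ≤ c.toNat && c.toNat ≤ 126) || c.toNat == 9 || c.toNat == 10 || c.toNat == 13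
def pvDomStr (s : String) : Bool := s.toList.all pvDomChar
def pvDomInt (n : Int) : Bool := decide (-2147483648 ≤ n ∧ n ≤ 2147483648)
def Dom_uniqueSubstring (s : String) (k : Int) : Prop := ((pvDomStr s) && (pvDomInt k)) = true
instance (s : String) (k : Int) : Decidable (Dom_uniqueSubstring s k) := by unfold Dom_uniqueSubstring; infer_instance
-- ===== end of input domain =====

-- B collects the length-k windows by walking the suffixes of s and sorts them with a hand-written
-- duplicate-eliminating merge sort, instead of A's hash-set collection followed by a library sort (alternative decomposition, same result on k ≥ 0).

-- ===== PORT A =====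
def uniqueSubstring (s : String) (k : Int) : List String :=
  let records : PySem.Set String :=
    (PySem.List.pyRange 0 ((s.toList.length : Int) - k + 1) 1).foldl
      (fun records i =>
        let word := String.ofList (PySem.List.slice s.toList (some i) (some (i + k)))
        if PySem.Set.contains records word then records
        else PySem.Set.add records word)
      PySem.Set.empty
  PySem.List.sorted records (fun x => x) false

-- ===== PORT B =====
-- transcription of Source B's _mergeu: the two-pointer merge loop, equal heads emitted once
def mergeU : List String → List String → List String
  | [], ys => ys
  | x :: xs, [] => x :: xs
  | x :: xs, y :: ys =>
      if x < y then x :: mergeU xs (y :: ys)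
      else if y < x then y :: mergeU (x :: xs) ys
      else x :: mergeU xs ys
termination_by xs ys => xs.length + ys.length

-- transcription of Source B's _msortu: split in half, sort each half, merge
def msortU (l : List String) : List String :=
  if l.length ≤ 1 then l
  else mergeU (msortU (l.take (l.length / 2))) (msortU (l.drop (l.length / 2)))
termination_by l.length
decreasing_by
  · simp only [List.length_take]; omega
  · simp only [List.length_drop]; omega

-- transcription of Source B's collection loop: t runs over the suffixes of s while len(t) >= k,
-- appending t[:k] to words
def collectW (kn : Nat) (t : List Char) (words : List String) : List String :=
  if kn ≤ t.length then
    match t with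
    | [] => words ++ [String.ofList (List.take kn ([] : List Char))]
    | _ :: r => collectW kn r (words ++ [String.ofList (t.take kn)])
  else words

def uniqueSubstring_alt (s : String) (k : Int) : List String :=
  if k < 0 then [] else msortU (collectW k.toNat s.toList [])

-- ===== PRECONDITION & SPEC =====
-- Pre_ restricts to the natural domain of a substring length, k ≥ 0: for negative k
-- A still returns a value, but it is an artefact of Python's negative-slice-stop wraparound.
def Pre_uniqueSubstring (s : String) (k : Int) : Prop := 0 ≤ k
instance (s : String) (k : Int) : Decidable (Pre_uniqueSubstring s k) := by unfold Pre_uniqueSubstring; infer_instance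
def pvWitness_uniqueSubstring : String × Int := ("abcab", 2)

def Spec_uniqueSubstring (s : String) (k : Int) (out : List String) : Prop := out = uniqueSubstring_alt s k
instance (s : String) (k : Int) (out : List String) : Decidable (Spec_uniqueSubstring s k out) := by unfold Spec_uniqueSubstring; infer_instance

-- ===== CLAIM (what is proved, stated in full; the proofs are below) =====
def Claim_equal_uniqueSubstring : Prop := ∀ (s : String) (k : Int), Dom_uniqueSubstring s k → Pre_uniqueSubstring s k → Spec_uniqueSubstring s k (uniqueSubstring s k)

-- ===== LEMMAS AND PROOFS =====

theorem mem_mergeU (xs ys : List String) (z : String) :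
    z ∈ mergeU xs ys ↔ z ∈ xs ∨ z ∈ ys := by
  induction xs, ys using mergeU.induct with
  | case1 ys => simp [mergeU]
  | case2 x xs => simp [mergeU]
  | case3 x xs y ys h ih =>
    rw [mergeU, if_pos h]
    simp only [List.mem_cons, ih]; tauto
  | case4 x xs y ys h1 h2 ih =>
    rw [mergeU, if_neg h1, if_pos h2]
    simp only [List.mem_cons, ih]; tauto
  | case5 x xs y ys h1 h2 ih =>
    have hxy : x = y := le_antisymm (not_lt.mp h2) (not_lt.mp h1)
    rw [mergeU, if_neg h1, if_neg h2]
    simp only [List.mem_cons, ih, hxy]; tauto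

theorem pairwise_mergeU (xs ys : List String)
    (hx : xs.Pairwise (· < ·)) (hy : ys.Pairwise (· < ·)) :
    (mergeU xs ys).Pairwise (· < ·) := by
  induction xs, ys using mergeU.induct with
  | case1 ys => simpa [mergeU] using hy
  | case2 x xs => simpa [mergeU] using hx
  | case3 x xs y ys h ih =>
    obtain ⟨hxb, hxt⟩ := List.pairwise_cons.mp hx
    rw [mergeU, if_pos h]
    refine List.pairwise_cons.mpr ⟨?_, ih hxt hy⟩
    intro z hz
    rcases (mem_mergeU _ _ z).mp hz with hz | hz
    · exact hxb z hz
    · rcases List.mem_cons.mp hz with rfl | hz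
      · exact h
      · exact lt_trans h ((List.pairwise_cons.mp hy).1 z hz)
  | case4 x xs y ys h1 h2 ih =>
    obtain ⟨hyb, hyt⟩ := List.pairwise_cons.mp hy
    rw [mergeU, if_neg h1, if_pos h2]
    refine List.pairwise_cons.mpr ⟨?_, ih hx hyt⟩
    intro z hz
    rcases (mem_mergeU _ _ z).mp hz with hz | hz
    · rcases List.mem_cons.mp hz with rfl | hz
      · exact h2
      · exact lt_trans h2 ((List.pairwise_cons.mp hx).1 z hz)
    · exact hyb z hz
  | case5 x xs y ys h1 h2 ih =>
    have hxy : x = y := le_antisymm (not_lt.mp h2) (not_lt.mp h1)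
    obtain ⟨hxb, hxt⟩ := List.pairwise_cons.mp hx
    obtain ⟨hyb, hyt⟩ := List.pairwise_cons.mp hy
    rw [mergeU, if_neg h1, if_neg h2]
    refine List.pairwise_cons.mpr ⟨?_, ih hxt hyt⟩
    intro z hz
    rcases (mem_mergeU _ _ z).mp hz with hz | hz
    · exact hxb z hz
    · exact hxy ▸ hyb z hz

theorem mem_msortU (l : List String) (z : String) : z ∈ msortU l ↔ z ∈ l := by
  induction l using msortU.induct with
  | case1 l h => rw [msortU, if_pos h]
  | case2 l h ih1 ih2 =>
    rw [msortU, if_neg h, mem_mergeU, ih1, ih2, ← List.mem_append,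
      List.take_append_drop]

theorem pairwise_msortU (l : List String) : (msortU l).Pairwise (· < ·) := by
  induction l using msortU.induct with
  | case1 l h =>
    rw [msortU, if_pos h]
    match l, h with
    | [], _ => exact List.Pairwise.nil
    | [x], _ => exact List.pairwise_singleton _ x
  | case2 l h ih1 ih2 =>
    rw [msortU, if_neg h]
    exact pairwise_mergeU _ _ ih1 ih2

theorem mem_collectW (kn : Nat) (t : List Char) :
    ∀ (words : List String) (x : String), x ∈ collectW kn t words ↔
      x ∈ words ∨ (∃ j, j + kn ≤ t.length ∧ x = String.ofList ((t.drop j).take kn)) := by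
  induction t with
  | nil =>
    intro words x
    rw [collectW]
    by_cases h : kn ≤ ([] : List Char).length
    · have hkn : kn = 0 := by simpa using h
      subst hkn
      rw [if_pos h, List.mem_append]
      constructor
      · rintro (hx | hx)
        · exact Or.inl hx
        · exact Or.inr ⟨0, by simp, by simpa using hx⟩
      · rintro (hx | ⟨j, hj, rfl⟩)
        · exact Or.inl hx
        · exact Or.inr (by simp)
    · rw [if_neg h]
      constructor
      · exact Or.inl
      · rintro (hx | ⟨j, hj, rfl⟩)
        · exact hx
        · exact absurd (by omega : kn ≤ ([] : List Char).length) h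
  | cons c r ih =>
    intro words x
    rw [collectW]
    by_cases h : kn ≤ (c :: r).length
    · rw [if_pos h, ih _ x, List.mem_append]
      constructor
      · rintro ((hx | hx) | ⟨j, hj, rfl⟩)
        · exact Or.inl hx
        · exact Or.inr ⟨0, by simpa using h, by simpa using hx⟩
        · exact Or.inr ⟨j + 1, by simp; omega, by simp⟩
      · rintro (hx | ⟨j, hj, rfl⟩)
        · exact Or.inl (Or.inl hx)
        · cases j with
          | zero => exact Or.inl (Or.inr (by simp))
          | succ j' =>
            exact Or.inr ⟨j', by simp at hj ⊢; omega, by simp⟩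
    · rw [if_neg h]
      constructor
      · exact Or.inl
      · rintro (hx | ⟨j, hj, rfl⟩)
        · exact hx
        · exact absurd (by omega : kn ≤ (c :: r).length) h

-- ===== VERDICT (by name: the statement is the Claim_ definition above) =====
theorem uniqueSubstring_spec : Claim_equal_uniqueSubstring := by
  intro s k _ hk
  have hk0 : 0 ≤ k := hk
  unfold Spec_uniqueSubstring uniqueSubstring uniqueSubstring_alt
  rw [if_neg (by omega : ¬ k < 0)]
  set word : Int → String :=
    fun i => String.ofList (PySem.List.slice s.toList (some i) (some (i + k))) with hword
  set subs : List String :=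
    (PySem.List.pyRange 0 ((s.toList.length : Int) - k + 1) 1).map word with hsubs
  have hrec : (PySem.List.pyRange 0 ((s.toList.length : Int) - k + 1) 1).foldl
      (fun records i => if PySem.Set.contains records (word i) then records
        else PySem.Set.add records (word i)) PySem.Set.empty
      = PySem.Set.ofList subs := by
    have hfun : (fun (r : PySem.Set String) i =>
        if PySem.Set.contains r (word i) then r else PySem.Set.add r (word i))
        = fun (r : PySem.Set String) i => PySem.Set.add r (word i) := by
      funext r i
      by_cases h : PySem.Set.contains r (word i) = true
      · simp only [PySem.Set.add, h, if_true]
      · simp only [if_neg h]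
    rw [hfun, ← List.foldl_map, PySem.Set.ofList_eq_foldl]
    rfl
  rw [hrec]
  show PySem.List.sorted (PySem.Set.ofList subs) (fun x => x) false
      = msortU (collectW k.toNat s.toList [])
  have hws : ∀ i : Int, 0 ≤ i → word i = String.ofList ((s.toList.drop i.toNat).take k.toNat) := by
    intro i hi
    show String.ofList (PySem.List.slice s.toList (some i) (some (i + k))) = _
    rw [PySem.List.slice_toNat s.toList hi (by omega)]
    congr 2
    omega
  have hperm : List.Perm (msortU (collectW k.toNat s.toList [])) (PySem.Set.ofList subs) := by
    refine (List.perm_ext_iff_of_nodup ((pairwise_msortU _).imp ne_of_lt)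
      (PySem.Set.nodup_ofList subs)).mpr ?_
    intro x
    rw [mem_msortU, mem_collectW, PySem.Set.mem_ofList, hsubs, List.mem_map]
    constructor
    · rintro (hx | ⟨j, hj, rfl⟩)
      · simp at hx
      · refine ⟨(j : Int), ?_, ?_⟩
        · rw [PySem.List.mem_pyRange_one]; omega
        · rw [hws (j : Int) (by omega)]
          simp
    · rintro ⟨i, hi, rfl⟩
      rw [PySem.List.mem_pyRange_one] at hi
      refine Or.inr ⟨i.toNat, by omega, ?_⟩
      rw [hws i (by omega)]
  exact PySem.List.sorted_eq_of_perm_of_pairwise_lt _ _ (fun x => x) hperm (pairwise_msortU _)
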